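-- pv_equiv track=rewrite | github.com/devmgardner/Codewars | codewars/Alpha-Numeric Converter/Alpha-Numeric Converter.py | AlphaNum_NumAlpha
-- ===== SOURCE A (Python) =====
-- alphabet = ['a', 'b', 'c', 'd', 'e', 'f', 'g', 'h', 'i', 'j', 'k', 'l', 'm', 'n', 'o', 'p', 'q', 'r', 's', 't', 'u', 'v', 'w', 'x', 'y', 'z']
--
-- alphabetnums = {'a': '1', 'b': '2', 'c': '3', 'd': '4', 'e': '5', 'f': '6', 'g': '7', 'h': '8', 'i': '9', 'j': '10', 'k': '11', 'l': '12', 'm': '13', 'n': '14', 'o': '15', 'p': '16', 'q': '17', 'r': '18', 's': '19', 't': '20', 'u': '21', 'v': '22', 'w': '23', 'x': '24', 'y': '25', 'z': '26'}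
--
-- numsalpha = {}
--
-- def AlphaNum_NumAlpha(string):
--     conv = []
--     inp = list(str(string))
--     while len(inp) > 1:
--         if inp[0] in alphabet:
--             conv.append(alphabetnums[inp[0]])
--             del inp[0]
--         elif not inp[0] in alphabet:
--             if not inp[1] in alphabet:
--                 num = inp[0] + inp[1]
--                 conv.append(numsalpha[num])
--                 del inp[:2]
--             elif inp[1] in alphabet:
--                 conv.append(numsalpha[inp[0]])
--                 del inp[0]
--     if len(inp) == 1:
--         if inp[0] in alphabet:
--             conv.append(alphabetnums[inp[0]])
--         else:
--             conv.append(numsalpha[inp[0]])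
--     return ''.join(conv)
-- ===== SOURCE B (Python) =====
-- def AlphaNum_NumAlpha(string):
--     # Single pass: each lowercase letter maps arithmetically to str(ord(c) - 96).
--     return ''.join(str(ord(c) - 96) for c in str(string))
-- ===== Notes on version B (the rewrite author's own statement) =====
-- stated objective: faster
-- what changed: Replaced the O(n^2) while-loop with repeated front deletions and dict lookups by a single pass computing each code arithmetically from ord(c).
import Mathlib
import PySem

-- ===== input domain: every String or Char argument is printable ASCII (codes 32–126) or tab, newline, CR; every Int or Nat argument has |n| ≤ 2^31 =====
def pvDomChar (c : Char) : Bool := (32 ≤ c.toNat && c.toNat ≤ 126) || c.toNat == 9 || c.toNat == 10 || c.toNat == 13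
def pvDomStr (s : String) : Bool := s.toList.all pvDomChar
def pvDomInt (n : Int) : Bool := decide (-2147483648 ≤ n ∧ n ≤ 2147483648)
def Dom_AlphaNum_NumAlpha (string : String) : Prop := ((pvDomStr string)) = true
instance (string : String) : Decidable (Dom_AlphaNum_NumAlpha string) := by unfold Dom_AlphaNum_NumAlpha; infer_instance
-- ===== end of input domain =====

-- B replaces A's quadratic delete-from-front loop and dict lookups by a single arithmetic pass (faster, asymptotic).


-- ===== PORT A =====
def pvAlphabet : List Char :=
  ['a','b','c','d','e','f','g','h','i','j','k','l','m','n','o','p','q','r','s','t','u','v','w','x','y','z']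

def pvAlphabetNums : PySem.Dict Char String := PySem.Dict.ofList
  [('a',"1"),('b',"2"),('c',"3"),('d',"4"),('e',"5"),('f',"6"),('g',"7"),('h',"8"),('i',"9"),
   ('j',"10"),('k',"11"),('l',"12"),('m',"13"),('n',"14"),('o',"15"),('p',"16"),('q',"17"),('r',"18"),
   ('s',"19"),('t',"20"),('u',"21"),('v',"22"),('w',"23"),('x',"24"),('y',"25"),('z',"26")]

-- numsalpha is the EMPTY dict in A; a lookup in it always raises KeyError in Python.
-- Those branches return a dummy "" here; Pre_ excludes exactly the inputs that reach them.
def pvLoopA : List Char → List String → List String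
  | c0 :: c1 :: rest, conv =>
    if c0 ∈ pvAlphabet then pvLoopA (c1 :: rest) (conv ++ [pvAlphabetNums.getD c0 ""])
    else if c1 ∉ pvAlphabet then pvLoopA rest (conv ++ [""])      -- numsalpha[c0+c1]: KeyError
    else pvLoopA (c1 :: rest) (conv ++ [""])                      -- numsalpha[c0]: KeyError
  | [c0], conv =>
    if c0 ∈ pvAlphabet then conv ++ [pvAlphabetNums.getD c0 ""] else conv ++ [""]  -- else: KeyError
  | [], conv => conv

def AlphaNum_NumAlpha (string : String) : String :=
  PySem.Str.join "" (pvLoopA string.toList [])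

-- ===== PORT B =====
def AlphaNum_NumAlpha_alt (string : String) : String :=
  PySem.Str.join "" (string.toList.map (fun c => PySem.Int.toStr ((c.toNat : Int) - 96)))

-- ===== PRECONDITION & SPEC =====
-- Pre_ excludes exactly the inputs on which A raises KeyError (any character that is not a
-- lowercase ASCII letter hits a lookup in the empty dict numsalpha).
def Pre_AlphaNum_NumAlpha (string : String) : Prop :=
  (string.toList.all (fun c => 97 ≤ c.toNat && c.toNat ≤ 122)) = true
instance (string : String) : Decidable (Pre_AlphaNum_NumAlpha string) := by
  unfold Pre_AlphaNum_NumAlpha; infer_instance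

def pvWitness_AlphaNum_NumAlpha : String := "hello"

def Spec_AlphaNum_NumAlpha (string : String) (out : String) : Prop := out = AlphaNum_NumAlpha_alt string
instance (string : String) (out : String) : Decidable (Spec_AlphaNum_NumAlpha string out) := by
  unfold Spec_AlphaNum_NumAlpha; infer_instance

-- ===== CLAIM (what is proved, stated in full; the proofs are below) =====
def Claim_equal_AlphaNum_NumAlpha : Prop := ∀ (string : String), Dom_AlphaNum_NumAlpha string → Pre_AlphaNum_NumAlpha string → Spec_AlphaNum_NumAlpha string (AlphaNum_NumAlpha string)

-- ===== LEMMAS AND PROOFS =====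

-- On a lowercase letter the two per-character encodings agree (26 cases, kernel-checked).
set_option maxRecDepth 8192 in
theorem pv_perChar : ∀ c ∈ pvAlphabet,
    pvAlphabetNums.getD c "" = PySem.Int.toStr ((c.toNat : Int) - 96) := by
  intro c hc
  fin_cases hc <;> rfl

set_option maxRecDepth 8192 in
theorem pv_mem_of_bounds (c : Char) (h : (97 ≤ c.toNat && c.toNat ≤ 122) = true) :
    c ∈ pvAlphabet := by
  simp only [Bool.and_eq_true, decide_eq_true_eq] at h
  obtain ⟨h1, h2⟩ := h
  rw [← Char.ofNat_toNat c]
  interval_cases c.toNat <;> decide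

theorem pv_loop (l : List Char) (hl : ∀ c ∈ l, c ∈ pvAlphabet) (conv : List String) :
    pvLoopA l conv = conv ++ l.map (fun c => pvAlphabetNums.getD c "") := by
  induction l generalizing conv with
  | nil => simp [pvLoopA]
  | cons c0 t ih =>
    have hc0 : c0 ∈ pvAlphabet := hl c0 (by simp)
    cases t with
    | nil => simp [pvLoopA, hc0]
    | cons c1 rest =>
      rw [show pvLoopA (c0 :: c1 :: rest) conv
            = pvLoopA (c1 :: rest) (conv ++ [pvAlphabetNums.getD c0 ""]) by
          simp [pvLoopA, hc0]]
      rw [ih (fun c hc => hl c (by simp [hc]))]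
      simp

-- ===== VERDICT (by name: the statement is the Claim_ definition above) =====
theorem AlphaNum_NumAlpha_spec : Claim_equal_AlphaNum_NumAlpha := by
  intro s _ hpre
  unfold Spec_AlphaNum_NumAlpha AlphaNum_NumAlpha AlphaNum_NumAlpha_alt
  have hl : ∀ c ∈ s.toList, c ∈ pvAlphabet := by
    intro c hc
    exact pv_mem_of_bounds c (by
      unfold Pre_AlphaNum_NumAlpha at hpre
      simpa using (List.all_eq_true.mp hpre c hc))
  rw [pv_loop s.toList hl []]
  simp only [List.nil_append]
  congr 1
  exact List.map_congr_left (fun c hc => pv_perChar c (hl c hc))
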